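-- pv_equiv track=rewrite | github.com/Jay921/LinkPrediction | sml_assignment_1_final.py | venue_
-- ===== SOURCE A (Python) =====
-- def venue_ (nodes_dict):
--     venues = []
--     for i in range(len(nodes_dict)):
--         venues_no = []
--         for j in range(0,348):
--             if "venue_{}".format(j) in nodes_dict[i].keys():
--                 venues_no.append(1)
--             else:
--                 venues_no.append(0)
--
--         venues.append(venues_no)
--
--     return venues
-- ===== SOURCE B (Python) =====
-- def venue_(nodes_dict):
--     # Invert the traversal: build the venue-name -> slot index once, then
--     # scan only the keys each node actually has.
--     index = {"venue_{}".format(n): n for n in range(348)}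
--     venues = []
--     for node in nodes_dict:
--         vec = [0] * 348
--         for key in node:
--             n = index.get(key)
--             if n is not None:
--                 vec[n] = 1
--         venues.append(vec)
--     return venues
-- ===== Notes on version B (the rewrite author's own statement) =====
-- stated objective: faster
-- what changed: Instead of probing all 348 fixed venue-name keys per node, B builds the venue-name -> slot-index dictionary once and, for each node, scans only the keys actually present, marking their slots in a zeroed vector.
import Mathlib
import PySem

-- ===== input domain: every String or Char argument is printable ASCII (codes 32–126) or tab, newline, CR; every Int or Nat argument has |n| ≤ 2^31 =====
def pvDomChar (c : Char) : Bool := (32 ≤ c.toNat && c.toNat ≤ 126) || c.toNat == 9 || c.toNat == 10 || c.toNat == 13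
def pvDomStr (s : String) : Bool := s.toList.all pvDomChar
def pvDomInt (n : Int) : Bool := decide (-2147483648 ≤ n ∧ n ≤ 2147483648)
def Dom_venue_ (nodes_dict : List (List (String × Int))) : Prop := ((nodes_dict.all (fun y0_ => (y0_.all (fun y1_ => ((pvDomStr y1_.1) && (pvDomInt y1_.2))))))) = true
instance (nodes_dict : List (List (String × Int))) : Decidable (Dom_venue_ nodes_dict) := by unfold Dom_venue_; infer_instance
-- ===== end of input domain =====

-- B builds the venue-name → slot-index dictionary once and scans only the keys each
-- node actually has, instead of probing all 348 fixed names per node (objective: faster/alternative).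

-- ===== PORT A =====
-- "venue_{}".format(j)
def venueName (j : Int) : String := "venue_" ++ PySem.Int.toStr j

def venue_ (nodes_dict : List (List (String × Int))) : List (List Int) :=
  nodes_dict.map (fun node =>
    (PySem.List.pyRange 0 348 1).map (fun j =>
      if (node.map Prod.fst).contains (venueName j) then (1 : Int) else 0))

-- ===== PORT B =====
-- index = {"venue_{}".format(n): n for n in range(348)}
def venueIndex : PySem.Dict String Int :=
  PySem.Dict.ofList ((PySem.List.pyRange 0 348 1).map (fun n => (venueName n, n)))

-- per-node loop: vec = [0]*348; for key in node: n = index.get(key); if n is not None: vec[n] = 1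
def venueRow (node : List (String × Int)) : List Int :=
  node.foldl (fun vec kv =>
    match venueIndex.get? kv.1 with
    | some n => vec.set n.toNat 1
    | none => vec) (List.replicate 348 0)

def venue__alt (nodes_dict : List (List (String × Int))) : List (List Int) :=
  nodes_dict.map venueRow

-- ===== PRECONDITION & SPEC =====
def Spec_venue_ (nodes_dict : List (List (String × Int))) (out : List (List Int)) : Prop := out = venue__alt nodes_dict
instance (nodes_dict : List (List (String × Int))) (out : List (List Int)) : Decidable (Spec_venue_ nodes_dict out) := by unfold Spec_venue_; infer_instance

-- ===== CLAIM (what is proved, stated in full; the proofs are below) =====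
def Claim_equal_venue_ : Prop := ∀ (nodes_dict : List (List (String × Int))), Dom_venue_ nodes_dict → Spec_venue_ nodes_dict (venue_ nodes_dict)

-- ===== LEMMAS AND PROOFS =====

theorem digitChar_inj : ∀ i < 10, ∀ j < 10, Nat.digitChar i = Nat.digitChar j → i = j := by decide

theorem toDigits10_inj (n : ℕ) : ∀ m : ℕ, Nat.toDigits 10 n = Nat.toDigits 10 m → n = m := by
  induction n using Nat.strong_induction_on with
  | _ n ih =>
    intro m h
    by_cases hn : n < 10 <;> by_cases hm : m < 10
    · rw [Nat.toDigits_of_lt_base hn, Nat.toDigits_of_lt_base hm] at h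
      simp only [List.cons.injEq] at h
      exact digitChar_inj n hn m hm h.1
    · have h2 : Nat.toDigits 10 m = Nat.toDigits 10 (m / 10) ++ [(m % 10).digitChar] := by
        rw [Nat.toDigits_eq_if (by norm_num)]; rw [if_neg hm]
      rw [Nat.toDigits_of_lt_base hn, h2] at h
      have hl := congrArg List.length h
      simp only [List.length_append, List.length_cons, List.length_nil] at hl
      have := @Nat.length_toDigits_pos 10 (m / 10)
      omega
    · have h1 : Nat.toDigits 10 n = Nat.toDigits 10 (n / 10) ++ [(n % 10).digitChar] := by
        rw [Nat.toDigits_eq_if (by norm_num)]; rw [if_neg hn]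
      rw [h1, Nat.toDigits_of_lt_base hm] at h
      have hl := congrArg List.length h
      simp only [List.length_append, List.length_cons, List.length_nil] at hl
      have := @Nat.length_toDigits_pos 10 (n / 10)
      omega
    · have h1 : Nat.toDigits 10 n = Nat.toDigits 10 (n / 10) ++ [(n % 10).digitChar] := by
        rw [Nat.toDigits_eq_if (by norm_num)]; rw [if_neg hn]
      have h2 : Nat.toDigits 10 m = Nat.toDigits 10 (m / 10) ++ [(m % 10).digitChar] := by
        rw [Nat.toDigits_eq_if (by norm_num)]; rw [if_neg hm]
      rw [h1, h2] at h
      obtain ⟨hpre, hlast⟩ := List.append_inj' h rfl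
      have hdiv : n / 10 = m / 10 := ih (n / 10) (Nat.div_lt_self (by omega) (by norm_num)) _ hpre
      simp only [List.cons.injEq] at hlast
      have hmod : n % 10 = m % 10 :=
        digitChar_inj (n % 10) (Nat.mod_lt _ (by norm_num)) (m % 10) (Nat.mod_lt _ (by norm_num)) hlast.1
      omega

theorem venueName_inj {n m : Int} (hn : 0 ≤ n) (hm : 0 ≤ m) (h : venueName n = venueName m) : n = m := by
  have h' := congrArg String.toList h
  simp only [venueName, String.toList_append] at h'
  have h'' : (PySem.Int.toStr n).toList = (PySem.Int.toStr m).toList := List.append_cancel_left h'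
  rw [PySem.Int.toList_toStr, PySem.Int.toList_toStr] at h''
  simp only [PySem.Int.toChars, if_neg (by omega : ¬ n < 0), if_neg (by omega : ¬ m < 0)] at h''
  have := toDigits10_inj n.toNat m.toNat h''
  omega

theorem get?_foldl_insert_name (l : List Int) :
    ∀ (d : PySem.Dict String Int) (k : String),
    (l.foldl (fun d n => d.insert (venueName n) n) d).get? k =
      (match l.reverse.find? (fun n => k == venueName n) with
       | some n => some n
       | none => d.get? k) := by
  induction l with
  | nil => intro d k; simp
  | cons n t ih =>
    intro d k
    rw [List.foldl_cons, ih]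
    rw [List.reverse_cons, List.find?_append]
    cases hfind : t.reverse.find? (fun n => k == venueName n) with
    | some m => simp
    | none =>
      simp only [Option.none_or]
      by_cases hk : k = venueName n
      · simp [List.find?, hk]
      · rw [PySem.Dict.get?_insert_of_ne _ _ hk]
        simp [List.find?, beq_eq_false_iff_ne.mpr hk]

theorem venueIndex_eq :
    venueIndex = (PySem.List.pyRange 0 348 1).foldl (fun acc n => acc.insert (venueName n) n)
      PySem.Dict.empty := by
  simp [venueIndex, PySem.Dict.ofList, PySem.Dict.update, List.foldl_map]

theorem venueIndex_get?_some {k : String} {n : Int} (h : venueIndex.get? k = some n) :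
    k = venueName n ∧ 0 ≤ n ∧ n < 348 := by
  rw [venueIndex_eq, get?_foldl_insert_name] at h
  cases hfind : (PySem.List.pyRange 0 348 1).reverse.find? (fun n => k == venueName n) with
  | none => rw [hfind] at h; simp [PySem.Dict.get?_empty] at h
  | some m =>
    rw [hfind] at h
    have hm := List.find?_some hfind
    have hmem := List.mem_reverse.mp (List.mem_of_find?_eq_some hfind)
    have hrange := PySem.List.mem_pyRange_one.mp hmem
    simp only [beq_iff_eq] at hm
    simp only [Option.some.injEq] at h
    subst h
    exact ⟨hm, hrange.1, hrange.2⟩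

theorem venueIndex_get?_name {j : Int} (h0 : 0 ≤ j) (h1 : j < 348) :
    venueIndex.get? (venueName j) = some j := by
  rw [venueIndex_eq, get?_foldl_insert_name]
  cases hfind : (PySem.List.pyRange 0 348 1).reverse.find? (fun n => venueName j == venueName n) with
  | none =>
    exfalso
    have := List.find?_eq_none.mp hfind j
      (List.mem_reverse.mpr (PySem.List.mem_pyRange_one.mpr ⟨h0, h1⟩))
    simp at this
  | some m =>
    have hm := List.find?_some hfind
    have hmem := List.mem_reverse.mp (List.mem_of_find?_eq_some hfind)
    have hrange := PySem.List.mem_pyRange_one.mp hmem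
    simp only [beq_iff_eq] at hm
    have : j = m := venueName_inj h0 hrange.1 hm
    simp [this]

theorem rowFold_eq (node : List (String × Int)) :
    ∀ (vec : List Int), vec.length = 348 →
    node.foldl (fun vec kv =>
        match venueIndex.get? kv.1 with
        | some n => vec.set n.toNat 1
        | none => vec) vec
      = (PySem.List.pyRange 0 348 1).map
          (fun j => if (node.map Prod.fst).contains (venueName j) then 1 else vec.getD j.toNat 0) := by
  induction node with
  | nil =>
    intro vec hlen
    simp only [List.foldl_nil, List.map_nil, List.contains_nil, if_neg Bool.false_ne_true]
    rw [PySem.List.pyRange_zero 348, List.map_map]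
    apply List.ext_getElem
    · simp [hlen]
    · intro i h1 h2
      have hi : i < vec.length := h1
      simp only [List.getElem_map, List.getElem_range, Function.comp_apply, Int.toNat_natCast]
      rw [List.getD_eq_getElem vec 0 hi]
  | cons kv rest ih =>
    intro vec hlen
    rw [List.foldl_cons]
    cases hk : venueIndex.get? kv.1 with
    | none =>
      rw [ih vec hlen]
      apply List.map_congr_left
      intro j hj
      have hjr := PySem.List.mem_pyRange_one.mp hj
      have hne : kv.1 ≠ venueName j := by
        intro he
        rw [he, venueIndex_get?_name hjr.1 hjr.2] at hk
        simp at hk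
      rw [List.map_cons, List.contains_cons, beq_eq_false_iff_ne.mpr (Ne.symm hne), Bool.false_or]
    | some n =>
      obtain ⟨hname, hn0, hn348⟩ := venueIndex_get?_some hk
      rw [ih (vec.set n.toNat 1) (by simp [hlen])]
      apply List.map_congr_left
      intro j hj
      have hjr := PySem.List.mem_pyRange_one.mp hj
      rw [List.map_cons, List.contains_cons]
      by_cases hrest : (List.map Prod.fst rest).contains (venueName j) = true
      · rw [if_pos hrest, if_pos (by rw [hrest, Bool.or_true])]
      · rw [if_neg hrest]
        by_cases hkj : kv.1 = venueName j
        · have hnj : n = j := venueName_inj hn0 hjr.1 (hname ▸ hkj)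
          subst hnj
          rw [if_pos (by simp [hkj])]
          rw [List.getD_eq_getElem?_getD, List.getElem?_set_self (by omega : n.toNat < vec.length)]
          rfl
        · have hcond : ¬ ((venueName j == kv.1 || (List.map Prod.fst rest).contains (venueName j)) = true) := by
            simp only [Bool.or_eq_true, beq_iff_eq]
            rintro (he | hc)
            · exact hkj he.symm
            · exact hrest hc
          rw [if_neg hcond]
          rw [List.getD_eq_getElem?_getD, List.getD_eq_getElem?_getD,
            List.getElem?_set_ne (by
              intro he
              refine hkj ?_
              rw [hname]
              exact congrArg venueName (by omega))]

-- ===== VERDICT (by name: the statement is the Claim_ definition above) =====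
set_option maxRecDepth 2000 in
theorem venue__spec : Claim_equal_venue_ := by
  intro nodes_dict _
  unfold Spec_venue_ venue_ venue__alt venueRow
  apply List.map_congr_left
  intro node _
  rw [rowFold_eq node (List.replicate 348 0) (List.length_replicate ..)]
  apply List.map_congr_left
  intro j _
  have hz : (List.replicate 348 (0 : Int)).getD j.toNat 0 = 0 := by
    rw [List.getD_eq_getElem?_getD, List.getElem?_replicate]
    split <;> rfl
  rw [hz]
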